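-- pv_equiv track=rewrite | github.com/AndrewGallacher/advent-of-code-2021 | day12/day12.py | is_cave_usable
-- ===== SOURCE A (Python) =====
-- def is_cave_usable(cave, path):
--     if cave == cave.upper():
--         # This is a big cave and is always usable
--         return True
--
--     if not cave in path:
--         # A small cave that's not been used before -> usable
--         return True
--
--     # If we're still here we have a small cave that's been used before
--     if cave == 'start' or cave == 'end':
--         return False
--
--     # If any small cave has been used before we can't use this one
--     used_small_caves = []
--     for small_cave in path:
--         if small_cave == small_cave.lower():
--             if not small_cave in used_small_caves:
--                 used_small_caves.append(small_cave)
--             else: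
--                 return False
--
--     return True
-- ===== SOURCE B (Python) =====
-- def is_cave_usable(cave, path):
--     if cave == cave.upper() or cave not in path:
--         return True
--     if cave == 'start' or cave == 'end':
--         return False
--     # sort the small caves and scan adjacent neighbours: a duplicate in the
--     # original multiset appears as an equal adjacent pair after sorting
--     small = sorted(c for c in path if c == c.lower())
--     return all(a != b for a, b in zip(small, small[1:]))
-- ===== Notes on version B (the rewrite author's own statement) =====
-- stated objective: alternative
-- what changed: A's incremental used_small_caves accumulator with per-element membership tests and early exit is replaced by sort-then-adjacent-scan: sort the small caves of path once, then check no two adjacent sorted elements are equal.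
import Mathlib
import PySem

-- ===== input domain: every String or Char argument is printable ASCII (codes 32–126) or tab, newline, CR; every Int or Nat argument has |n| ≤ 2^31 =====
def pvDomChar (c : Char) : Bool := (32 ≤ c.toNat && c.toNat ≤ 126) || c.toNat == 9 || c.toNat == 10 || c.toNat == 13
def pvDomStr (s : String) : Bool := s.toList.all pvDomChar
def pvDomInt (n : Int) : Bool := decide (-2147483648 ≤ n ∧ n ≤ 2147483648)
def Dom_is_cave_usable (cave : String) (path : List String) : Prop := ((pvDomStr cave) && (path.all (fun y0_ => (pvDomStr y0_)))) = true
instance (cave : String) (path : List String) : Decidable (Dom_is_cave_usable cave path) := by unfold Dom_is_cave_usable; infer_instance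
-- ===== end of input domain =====

-- B replaces A's incremental used_small_caves accumulator (with per-element
-- membership tests and early exit) by sort-then-adjacent-scan over the small caves.

-- ===== PORT A =====
-- the 'for small_cave in path' loop of A, with its 'used_small_caves' accumulator
def isCaveUsableLoop (used : List String) : List String → Bool
  | [] => true
  | small_cave :: rest =>
    if small_cave == PySem.Str.lower small_cave then
      if !(used.contains small_cave) then
        isCaveUsableLoop (used ++ [small_cave]) rest
      else
        false
    else
      isCaveUsableLoop used rest

def is_cave_usable (cave : String) (path : List String) : Bool :=
  if cave == PySem.Str.upper cave then true
  else if !(path.contains cave) then true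
  else if cave == "start" || cave == "end" then false
  else isCaveUsableLoop [] path

-- ===== PORT B =====
def is_cave_usable_alt (cave : String) (path : List String) : Bool :=
  if cave == PySem.Str.upper cave || !(path.contains cave) then true
  else if cave == "start" || cave == "end" then false
  else
    let small := PySem.List.sorted (path.filter (fun c => c == PySem.Str.lower c)) (fun x => x) false
    (small.zip (small.drop 1)).all (fun p => p.1 != p.2)

-- ===== PRECONDITION & SPEC =====
def Spec_is_cave_usable (cave : String) (path : List String) (out : Bool) : Prop := out = is_cave_usable_alt cave path
instance (cave : String) (path : List String) (out : Bool) : Decidable (Spec_is_cave_usable cave path out) := by unfold Spec_is_cave_usable; infer_instance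

-- ===== CLAIM (what is proved, stated in full; the proofs are below) =====
def Claim_equal_is_cave_usable : Prop := ∀ (cave : String) (path : List String), Dom_is_cave_usable cave path → Spec_is_cave_usable cave path (is_cave_usable cave path)

-- ===== LEMMAS AND PROOFS =====

-- A's loop, started with a duplicate-free accumulator, decides Nodup of the
-- accumulator followed by the small caves of the remaining list.
theorem isCaveUsableLoop_eq (l : List String) (used : List String) (h : used.Nodup) :
    isCaveUsableLoop used l =
      decide ((used ++ l.filter (fun c => c == PySem.Str.lower c)).Nodup) := by
  induction l generalizing used with
  | nil => simp [isCaveUsableLoop, h]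
  | cons c rest ih =>
    by_cases hp : (c == PySem.Str.lower c) = true
    · by_cases hm : c ∈ used
      · have hnd : ¬ (used ++ c :: rest.filter (fun c => c == PySem.Str.lower c)).Nodup := by
          intro hn
          exact (List.disjoint_of_nodup_append hn) hm (List.mem_cons_self)
        simp [isCaveUsableLoop, hp, hm, List.filter, hnd]
      · have h2 : (used ++ [c]).Nodup := by
          simp [List.nodup_append, h]
          intro a ha hb
          exact hm (hb ▸ ha)
        rw [show isCaveUsableLoop used (c :: rest)
              = isCaveUsableLoop (used ++ [c]) rest by simp [isCaveUsableLoop, hp, hm]]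
        rw [ih (used ++ [c]) h2]
        congr 1
        simp [List.filter, hp, List.append_assoc]
    · rw [show isCaveUsableLoop used (c :: rest) = isCaveUsableLoop used rest by
          simp [isCaveUsableLoop, hp]]
      rw [ih used h]
      congr 2
      simp [List.filter, hp]

-- On a ≤-sorted list, "no two adjacent elements are equal" decides Nodup.
theorem zip_adj_ne_eq_nodup (ys : List String) (h : ys.Pairwise (· ≤ ·)) :
    ((ys.zip (ys.drop 1)).all (fun p => p.1 != p.2)) = decide ys.Nodup := by
  induction ys with
  | nil => simp
  | cons a t ih =>
    cases t with
    | nil => simp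
    | cons b t' =>
      have hab : a ≤ b := (List.pairwise_cons.mp h).1 b List.mem_cons_self
      have hrest : (b :: t').Pairwise (· ≤ ·) := (List.pairwise_cons.mp h).2
      have ihr := ih hrest
      simp only [List.drop_succ_cons, List.drop_zero, List.zip_cons_cons, List.all_cons] at *
      rw [ihr]
      by_cases hne : a = b
      · simp [hne]
      · have hnm : a ∉ b :: t' := by
          intro hmem
          rcases List.mem_cons.mp hmem with h1 | h2
          · exact hne h1
          · -- a appears after b: b ≤ a from pairwise, and a ≤ b, so a = b
            have hba : b ≤ a := (List.pairwise_cons.mp hrest).1 a h2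
            exact hne (le_antisymm hab hba)
        by_cases hnd : (b :: t').Nodup
        · have : (a :: b :: t').Nodup := List.nodup_cons.mpr ⟨hnm, hnd⟩
          simp [hne, hnd, this]
        · have : ¬ (a :: b :: t').Nodup := fun hh => hnd (List.nodup_cons.mp hh).2
          simp [hne, hnd, this]

-- ===== VERDICT (by name: the statement is the Claim_ definition above) =====
theorem is_cave_usable_spec : Claim_equal_is_cave_usable := by
  intro cave path _
  unfold Spec_is_cave_usable is_cave_usable is_cave_usable_alt
  cases hb1 : (cave == PySem.Str.upper cave) with
  | true => simp [hb1]
  | false =>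
    cases hb2 : path.contains cave with
    | false => simp [hb1, hb2]
    | true =>
      cases hb3 : (cave == "start" || cave == "end") with
      | true => simp [hb1, hb2, hb3]
      | false =>
        simp only [Bool.not_true, Bool.false_or, if_false, Bool.false_eq_true]
        have hperm := PySem.List.sorted_perm (path.filter (fun c => c == PySem.Str.lower c)) (fun x => x) false
        rw [isCaveUsableLoop_eq path [] List.nodup_nil, List.nil_append,
            zip_adj_ne_eq_nodup _ (PySem.List.sorted_pairwise _ (fun x => x)),
            decide_eq_decide]
        exact hperm.nodup_iff.symm
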